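-- pv_equiv track=rewrite | github.com/mgritter/freeauto | freeauto.py | cyclic_reduce
-- ===== SOURCE A (Python) =====
-- def cyclic_reduce( word ):
--     if len( word ) == 0:
--         return word
--
--     reduced = []
--     for a in word:
--         if len( reduced ) > 0 and -a == reduced[-1]:
--             reduced.pop()
--         else:
--             reduced.append( a )
--
--     while len( reduced ) >= 2:
--         if -reduced[0] == reduced[-1]:
--             reduced = reduced[1:-1]
--         else:
--             break
--
--     return reduced
-- ===== SOURCE B (Python) =====
-- def cyclic_reduce(word):
--     # Free reduction with a stack, then a two-pointer shrink from both ends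
--     # and ONE final slice (instead of A's repeated reslicing of the list).
--     stack = []
--     for a in word:
--         if stack and stack[-1] == -a:
--             stack.pop()
--         else:
--             stack.append(a)
--     i, j = 0, len(stack) - 1
--     while i < j and stack[i] == -stack[j]:
--         i += 1
--         j -= 1
--     return stack[i:j+1]
-- ===== Notes on version B (the rewrite author's own statement) =====
-- stated objective: alternative
-- what changed: A's cyclic trimming loop reslices the whole reduced list (reduced = reduced[1:-1]) once per cancelling end pair; B keeps the reduced word fixed and shrinks two index pointers from both ends, taking a single final slice.
import Mathlib
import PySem

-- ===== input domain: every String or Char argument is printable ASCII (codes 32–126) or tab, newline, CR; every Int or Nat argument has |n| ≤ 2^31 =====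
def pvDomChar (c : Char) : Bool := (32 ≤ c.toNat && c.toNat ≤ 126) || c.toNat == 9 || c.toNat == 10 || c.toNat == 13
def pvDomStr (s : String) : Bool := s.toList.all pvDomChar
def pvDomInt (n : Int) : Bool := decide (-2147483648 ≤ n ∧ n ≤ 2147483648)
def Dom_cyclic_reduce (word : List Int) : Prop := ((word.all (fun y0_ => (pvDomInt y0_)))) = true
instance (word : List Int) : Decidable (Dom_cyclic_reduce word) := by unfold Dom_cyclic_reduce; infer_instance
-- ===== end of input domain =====

-- B replaces A's "reslice the whole reduced list once per cancelling end pair"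
-- trimming loop by a two-pointer shrink with a single final slice (alternative
-- decomposition; the stack-based free-reduction pass is the same in both).

-- ===== PORT A =====
-- loop body: pop on cancellation, else append; reduced[-1] is getLastD (guarded nonempty, exact)
def pvStepA (reduced : List Int) (a : Int) : List Int :=
  if 0 < reduced.length ∧ -a = reduced.getLastD 0 then reduced.dropLast else reduced ++ [a]

-- while len(reduced) >= 2: if -reduced[0] == reduced[-1]: reduced = reduced[1:-1] else break
-- reduced[0] / reduced[-1] are getD 0 / getLastD (guarded len ≥ 2, exact);
-- reduced[1:-1] on a list of length ≥ 2 is (drop 1).dropLast (exact)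
def pvTrimA (r : List Int) : List Int :=
  if _h : 2 ≤ r.length then
    if -(r.getD 0 0) = r.getLastD 0 then pvTrimA ((r.drop 1).dropLast) else r
  else r
termination_by r.length
decreasing_by simp [List.length_dropLast]; omega

def cyclic_reduce (word : List Int) : List Int :=
  if word.length = 0 then word
  else pvTrimA (word.foldl pvStepA [])

-- ===== PORT B =====
-- loop body: `if stack and stack[-1] == -a` (guarded nonempty, exact)
def pvStepB (stack : List Int) (a : Int) : List Int :=
  if stack ≠ [] ∧ stack.getLastD 0 = -a then stack.dropLast else stack ++ [a]

-- while i < j and stack[i] == -stack[j]: i += 1; j -= 1; then stack[i:j+1].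
-- i, j ported as Nat: Python's j = len(stack)-1 is -1 only for the empty stack,
-- where the loop does not run and the slice is [] either way; inside the loop
-- i < j ≤ len-1 so indexing (getD, exact) and the final nonneg slice
-- stack[i:j+1] = (drop i).take (j+1-i) are exact.
def pvTwoPtr (s : List Int) (i j : Nat) : List Int :=
  if i < j ∧ s.getD i 0 = -(s.getD j 0) then pvTwoPtr s (i+1) (j-1)
  else (s.drop i).take (j + 1 - i)
termination_by j - i

def cyclic_reduce_alt (word : List Int) : List Int :=
  let stack := word.foldl pvStepB []
  pvTwoPtr stack 0 (stack.length - 1)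

-- ===== PRECONDITION & SPEC =====
def Spec_cyclic_reduce (word : List Int) (out : List Int) : Prop := out = cyclic_reduce_alt word
instance (word : List Int) (out : List Int) : Decidable (Spec_cyclic_reduce word out) := by unfold Spec_cyclic_reduce; infer_instance

-- ===== CLAIM (what is proved, stated in full; the proofs are below) =====
def Claim_equal_cyclic_reduce : Prop := ∀ (word : List Int), Dom_cyclic_reduce word → Spec_cyclic_reduce word (cyclic_reduce word)

-- ===== LEMMAS AND PROOFS =====

lemma pvStep_eq : pvStepA = pvStepB := by
  funext r a
  unfold pvStepA pvStepB
  have h : (0 < r.length ∧ -a = r.getLastD 0) ↔ (r ≠ [] ∧ r.getLastD 0 = -a) := by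
    constructor
    · rintro ⟨h1, h2⟩; exact ⟨List.ne_nil_of_length_pos h1, h2.symm⟩
    · rintro ⟨h1, h2⟩; exact ⟨List.length_pos_of_ne_nil h1, h2.symm⟩
  rw [if_congr h rfl rfl]

lemma pvTwoPtr_base (s : List Int) (i j : Nat) (h : j ≤ i) :
    pvTwoPtr s i j = pvTrimA ((s.drop i).take (j + 1 - i)) := by
  rw [pvTwoPtr, if_neg (fun hc => absurd hc.1 (by omega))]
  rw [pvTrimA, dif_neg (by simp only [List.length_take, List.length_drop]; omega)]

lemma pvTwoPtr_eq_trim (n : Nat) : ∀ (s : List Int) (i j : Nat), j < s.length → i ≤ j + 1 → j - i ≤ n →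
    pvTwoPtr s i j = pvTrimA ((s.drop i).take (j + 1 - i)) := by
  induction n with
  | zero =>
    intro s i j hj hij hn
    exact pvTwoPtr_base s i j (by omega)
  | succ n ih =>
    intro s i j hj hij hn
    by_cases hij2 : i < j
    · set t := (s.drop i).take (j + 1 - i) with ht
      have hlt : t.length = j + 1 - i := by
        simp [ht, List.length_take, List.length_drop]; omega
      have hti : t.getD 0 0 = s.getD i 0 := by
        simp only [ht, List.getD]
        rw [List.getElem?_take, if_pos (by omega), List.getElem?_drop]
        simp
      have htj : t.getLastD 0 = s.getD j 0 := by
        rw [List.getLastD_eq_getLast?, List.getLast?_eq_getElem?, hlt, ht]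
        rw [List.getElem?_take, if_pos (by omega), List.getElem?_drop]
        rw [show i + (j + 1 - i - 1) = j from by omega]
        rfl
      by_cases hval : s.getD i 0 = -(s.getD j 0)
      · have hrhs : pvTrimA t = pvTrimA ((t.drop 1).dropLast) := by
          rw [pvTrimA, dif_pos (by omega : 2 ≤ t.length)]
          rw [if_pos (by rw [hti, htj]; omega)]
        have hmid : (t.drop 1).dropLast = (s.drop (i+1)).take (j - 1 + 1 - (i + 1)) := by
          have h1 : t.drop 1 = (s.drop (i+1)).take (j - i) := by
            rw [ht, List.drop_take, List.drop_drop]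
            congr 1
            omega
          rw [h1, List.dropLast_eq_take, List.take_take]
          congr 1
          simp only [List.length_take, List.length_drop]
          omega
        have e1 : j - 1 < s.length := by omega
        have e2 : i + 1 ≤ j - 1 + 1 := by omega
        have e3 : j - 1 - (i + 1) ≤ n := by omega
        rw [pvTwoPtr, if_pos ⟨hij2, hval⟩]
        rw [ih s (i+1) (j-1) e1 e2 e3]
        rw [hrhs, hmid]
      · rw [pvTwoPtr, if_neg (by tauto)]
        rw [pvTrimA, dif_pos (by omega : 2 ≤ t.length)]
        rw [if_neg (by rw [hti, htj]; omega)]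
    · exact pvTwoPtr_base s i j (by omega)

lemma pvTrim_eq_twoPtr (s : List Int) : pvTrimA s = pvTwoPtr s 0 (s.length - 1) := by
  cases s with
  | nil =>
    rw [pvTrimA, dif_neg (by simp)]
    rw [pvTwoPtr, if_neg (fun h => absurd h.1 (lt_irrefl 0))]
    simp
  | cons a l =>
    rw [pvTwoPtr_eq_trim ((a :: l).length - 1) (a :: l) 0 ((a :: l).length - 1)
        (by simp) (by omega) (by omega)]
    simp

-- ===== VERDICT (by name: the statement is the Claim_ definition above) =====
theorem cyclic_reduce_spec : Claim_equal_cyclic_reduce := by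
  intro word _
  unfold Spec_cyclic_reduce cyclic_reduce cyclic_reduce_alt
  rw [pvStep_eq]
  by_cases h : word.length = 0
  · have hnil : word = [] := List.length_eq_zero_iff.mp h
    subst hnil
    simp [pvTwoPtr]
  · rw [if_neg h, pvTrim_eq_twoPtr]
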